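-- pv_equiv track=rewrite | github.com/tysmitht/tysmitht.github.io | source/SortingAnim.py | merge_ops
-- ===== SOURCE A (Python) =====
-- def merge_ops(arr):
--     operations = []
--
--     def merge_sort_(arr, l, r):
--         if l < r:
--             m = int(l + (r - l) / 2)
--             merge_sort_(arr, l, m)
--             merge_sort_(arr, m + 1, r)
--             merge_(arr, l, m, r)
--
--     def merge_(arr, l, m, r):
--         n1 = m - l + 1
--         n2 = r - m
--
--         L = [None for _ in range(n1)]
--         R = [None for _ in range(n2)]
--
--         # Copy data into temp arrays
--         for i in range(n1):
--             L[i] = arr[l + i]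
--         for j in range(n2):
--             R[j] = arr[m + 1 + j]
--
--         i = 0
--         j = 0
--         k = l
--         while i < n1 and j < n2:
--             if L[i] <= R[j]:
--                 operations.append(("w", L[i], k))
--                 arr[k] = L[i]
--                 i += 1
--             else:
--                 operations.append(("w", R[j], k))
--                 arr[k] = R[j]
--                 j += 1
--             k += 1
--
--         while i < n1:
--             operations.append(("w", L[i], k))
--             arr[k] = L[i]
--             i += 1
--             k += 1
--
--         while j < n2:
--             operations.append(("w", R[j], k))
--             arr[k] = R[j]
--             j += 1
--             k += 1
--
--     merge_sort_(arr, 0, len(arr) - 1)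
--     return operations
-- ===== SOURCE B (Python) =====
-- def merge_ops(arr):
--     operations = []
--
--     def merge_sort_(arr, l, r):
--         if l < r:
--             m = int(l + (r - l) / 2)
--             merge_sort_(arr, l, m)
--             merge_sort_(arr, m + 1, r)
--             merge_(arr, l, r)
--
--     def merge_(arr, l, r):
--         # Both halves are already sorted; a stable sort of the whole
--         # segment reproduces the exact stable two-pointer merge result.
--         merged = sorted(arr[l:r + 1])
--         for idx, val in enumerate(merged):
--             operations.append(("w", val, l + idx))
--             arr[l + idx] = val
--
--     merge_sort_(arr, 0, len(arr) - 1)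
--     return operations
-- ===== Notes on version B (the rewrite author's own statement) =====
-- stated objective: simpler
-- what changed: The hand-written merge step (two temp arrays and three index loops) is replaced by a stable sort of the whole segment written back in a single enumerate pass; since both halves are already sorted, the stable sort reproduces the exact same write trace.
import Mathlib
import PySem

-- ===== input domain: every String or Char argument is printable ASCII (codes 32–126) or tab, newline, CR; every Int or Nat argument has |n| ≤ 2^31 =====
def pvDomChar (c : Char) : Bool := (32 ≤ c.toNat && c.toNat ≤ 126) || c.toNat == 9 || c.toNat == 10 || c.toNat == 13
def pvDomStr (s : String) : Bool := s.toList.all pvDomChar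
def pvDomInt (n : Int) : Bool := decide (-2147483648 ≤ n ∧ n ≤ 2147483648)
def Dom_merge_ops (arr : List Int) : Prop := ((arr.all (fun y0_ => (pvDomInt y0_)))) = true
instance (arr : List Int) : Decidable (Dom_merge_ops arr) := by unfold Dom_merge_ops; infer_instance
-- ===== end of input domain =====

-- B replaces the hand-written two-pointer merge (temp arrays + three loops) by a stable
-- sort of the segment written back in one enumerate pass; same write trace, simpler code.
-- Both A and B mutate the argument list in place in the same way (identical writes);
-- the equivalence proved here is about the returned operation list.


-- ===== PORT A =====
-- trailing 'while i < n1' / 'while j < n2' loops: copy the rest of one temp array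
def pvMergeTail (vs : List Int) (k : Nat) (arr : List Int)
    (ops : List (String × Int × Int)) : List Int × List (String × Int × Int) :=
  match vs with
  | [] => (arr, ops)
  | v :: vs' => pvMergeTail vs' (k + 1) (arr.set k v) (ops ++ [("w", v, (k : Int))])

-- 'while i < n1 and j < n2' two-pointer loop over the temp arrays L, R
def pvMergeLoop (L R : List Int) (k : Nat) (arr : List Int)
    (ops : List (String × Int × Int)) : List Int × List (String × Int × Int) :=
  match L, R with
  | a :: L', b :: R' =>
      if a ≤ b then
        pvMergeLoop L' (b :: R') (k + 1) (arr.set k a) (ops ++ [("w", a, (k : Int))])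
      else
        pvMergeLoop (a :: L') R' (k + 1) (arr.set k b) (ops ++ [("w", b, (k : Int))])
  | [], rest => pvMergeTail rest k arr ops
  | rest, [] => pvMergeTail rest k arr ops

-- merge_(arr, l, m, r)
def pvMergeA (arr : List Int) (l m r : Nat)
    (ops : List (String × Int × Int)) : List Int × List (String × Int × Int) :=
  let n1 := m - l + 1
  let n2 := r - m
  let L := (List.range n1).map (fun i => arr.getD (l + i) 0)
  let R := (List.range n2).map (fun j => arr.getD (m + 1 + j) 0)
  pvMergeLoop L R l arr ops

-- merge_sort_(arr, l, r); fuel only makes the recursion structural (it never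
-- runs out: the recursion depth of merge sort is at most r - l ≤ len(arr))
def pvMergeSortA (fuel : Nat) (arr : List Int) (l r : Nat)
    (ops : List (String × Int × Int)) : List Int × List (String × Int × Int) :=
  if l < r then
    match fuel with
    | 0 => (arr, ops)
    | fuel + 1 =>
      let m := l + (r - l) / 2
      let s1 := pvMergeSortA fuel arr l m ops
      let s2 := pvMergeSortA fuel s1.1 (m + 1) r s1.2
      pvMergeA s2.1 l m r s2.2
  else (arr, ops)

def merge_ops (arr : List Int) : List (String × Int × Int) :=
  (pvMergeSortA arr.length arr 0 (arr.length - 1) []).2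

-- ===== PORT B =====
-- merge_(arr, l, r): stable-sort the segment, write it back with enumerate
def pvMergeB (arr : List Int) (l r : Nat)
    (ops : List (String × Int × Int)) : List Int × List (String × Int × Int) :=
  let merged := PySem.List.sorted
      (PySem.List.slice arr (some (l : Int)) (some ((r : Int) + 1))) (fun x => x) false
  (PySem.List.enumerate merged 0).foldl
    (fun st p => (st.1.set ((l : Int) + p.1).toNat p.2, st.2 ++ [("w", p.2, (l : Int) + p.1)]))
    (arr, ops)

def pvMergeSortB (fuel : Nat) (arr : List Int) (l r : Nat)
    (ops : List (String × Int × Int)) : List Int × List (String × Int × Int) :=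
  if l < r then
    match fuel with
    | 0 => (arr, ops)
    | fuel + 1 =>
      let m := l + (r - l) / 2
      let s1 := pvMergeSortB fuel arr l m ops
      let s2 := pvMergeSortB fuel s1.1 (m + 1) r s1.2
      pvMergeB s2.1 l r s2.2
  else (arr, ops)

def merge_ops_alt (arr : List Int) : List (String × Int × Int) :=
  (pvMergeSortB arr.length arr 0 (arr.length - 1) []).2

-- ===== PRECONDITION & SPEC =====
def Spec_merge_ops (arr : List Int) (out : List (String × Int × Int)) : Prop := out = merge_ops_alt arr
instance (arr : List Int) (out : List (String × Int × Int)) : Decidable (Spec_merge_ops arr out) := by unfold Spec_merge_ops; infer_instance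

-- ===== CLAIM (what is proved, stated in full; the proofs are below) =====
def Claim_equal_merge_ops : Prop := ∀ (arr : List Int), Dom_merge_ops arr → Spec_merge_ops arr (merge_ops arr)

-- ===== LEMMAS AND PROOFS =====

-- pure two-pointer merge (the value sequence A's merge loop writes)
def pvMerge : List Int → List Int → List Int
  | [], R => R
  | L, [] => L
  | a :: L', b :: R' =>
      if a ≤ b then a :: pvMerge L' (b :: R') else b :: pvMerge (a :: L') R'

-- write tags ("w", v, k) for consecutive positions starting at k
def pvTags : List Int → Nat → List (String × Int × Int)
  | [], _ => []
  | v :: vs, k => ("w", v, (k : Int)) :: pvTags vs (k + 1)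

-- overwrite arr[k..] with vs
def pvSetSeg : List Int → Nat → List Int → List Int
  | arr, _, [] => arr
  | arr, k, v :: vs => pvSetSeg (arr.set k v) (k + 1) vs

theorem pvMergeTail_eq (vs : List Int) (k : Nat) (arr : List Int)
    (ops : List (String × Int × Int)) :
    pvMergeTail vs k arr ops = (pvSetSeg arr k vs, ops ++ pvTags vs k) := by
  induction vs generalizing k arr ops with
  | nil => simp [pvMergeTail, pvSetSeg, pvTags]
  | cons v vs ih => simp [pvMergeTail, pvSetSeg, pvTags, ih]

theorem pvMergeLoop_eq (L : List Int) : ∀ (R : List Int) (k : Nat) (arr : List Int)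
    (ops : List (String × Int × Int)),
    pvMergeLoop L R k arr ops = (pvSetSeg arr k (pvMerge L R), ops ++ pvTags (pvMerge L R) k) := by
  induction L with
  | nil => intro R k arr ops; cases R <;> simp [pvMergeLoop, pvMerge, pvMergeTail_eq]
  | cons a L' ihL =>
    intro R
    induction R with
    | nil => intro k arr ops; simp [pvMergeLoop, pvMerge, pvMergeTail_eq]
    | cons b R' ihR =>
      intro k arr ops
      by_cases h : a ≤ b
      · simp only [pvMergeLoop, if_pos h, pvMerge]
        rw [ihL]
        simp [pvSetSeg, pvTags]
      · simp only [pvMergeLoop, if_neg h, pvMerge]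
        rw [ihR]
        simp [pvSetSeg, pvTags]

theorem pvMerge_perm (L : List Int) : ∀ (R : List Int), (pvMerge L R).Perm (L ++ R) := by
  induction L with
  | nil => intro R; cases R <;> simp [pvMerge]
  | cons a L' ihL =>
    intro R
    induction R with
    | nil => simp [pvMerge]
    | cons b R' ihR =>
      by_cases h : a ≤ b
      · simpa [pvMerge, h] using (ihL (b :: R')).cons a
      · simp only [pvMerge, if_neg h]
        refine (ihR.cons b).trans ?_
        exact List.perm_middle.symm

theorem pvMerge_mem {x : Int} {L R : List Int} (h : x ∈ pvMerge L R) : x ∈ L ∨ x ∈ R := by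
  have := (pvMerge_perm L R).mem_iff.mp h
  simpa using this

theorem pvMerge_pairwise (L : List Int) : ∀ (R : List Int), L.Pairwise (· ≤ ·) →
    R.Pairwise (· ≤ ·) → (pvMerge L R).Pairwise (· ≤ ·) := by
  induction L with
  | nil => intro R _ hR; cases R <;> simpa [pvMerge] using hR
  | cons a L' ihL =>
    intro R
    induction R with
    | nil => intro hL _; simpa [pvMerge] using hL
    | cons b R' ihR =>
      intro hL hR
      rcases List.pairwise_cons.mp hL with ⟨haL, hL'⟩
      rcases List.pairwise_cons.mp hR with ⟨hbR, hR'⟩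
      by_cases h : a ≤ b
      · simp only [pvMerge, if_pos h]
        refine List.pairwise_cons.mpr ⟨?_, ihL (b :: R') hL' hR⟩
        intro y hy
        rcases pvMerge_mem hy with hyL | hyR
        · exact haL y hyL
        · rcases List.mem_cons.mp hyR with rfl | hyR'
          · exact h
          · exact le_trans h (hbR y hyR')
      · simp only [pvMerge, if_neg h]
        refine List.pairwise_cons.mpr ⟨?_, ihR hL hR'⟩
        have hba : b ≤ a := le_of_lt (lt_of_not_ge h)
        intro y hy
        rcases pvMerge_mem hy with hyL | hyR
        · rcases List.mem_cons.mp hyL with rfl | hyL'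
          · exact hba
          · exact le_trans hba (haL y hyL')
        · exact hbR y hyR

theorem pvMerge_eq_sorted {L R : List Int}
    (hL : L.Pairwise (· ≤ ·)) (hR : R.Pairwise (· ≤ ·)) :
    pvMerge L R = PySem.List.sorted (L ++ R) (fun x => x) false :=
  (PySem.List.sorted_id_eq_of_perm_of_pairwise (L ++ R) (pvMerge L R)
    (pvMerge_perm L R) (pvMerge_pairwise L R hL hR)).symm

theorem pvSetSeg_eq (vs : List Int) (k : Nat) (arr : List Int)
    (h : k + vs.length ≤ arr.length) :
    pvSetSeg arr k vs = arr.take k ++ vs ++ arr.drop (k + vs.length) := by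
  induction vs generalizing k arr with
  | nil => simp [pvSetSeg]
  | cons v vs ih =>
    have hk : k < arr.length := by simp at h; omega
    have hv : k + 1 + vs.length ≤ (arr.set k v).length := by simp at h ⊢; omega
    rw [pvSetSeg, ih (k + 1) (arr.set k v) hv]
    have hset : arr.set k v = arr.take k ++ v :: arr.drop (k + 1) := by
      rw [List.set_eq_take_append_cons_drop, if_pos hk]
    have hlt : (arr.take k).length = k := by simp; omega
    rw [hset, List.take_append, List.drop_append, hlt]
    have e1 : List.take (k + 1) (List.take k arr) = List.take k arr := by
      rw [List.take_take]; congr 1; omega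
    have e2 : List.take (k + 1 - k) (v :: List.drop (k + 1) arr) = [v] := by
      have hx : k + 1 - k = 0 + 1 := by omega
      rw [hx, List.take_succ_cons, List.take_zero]
    have e3 : List.drop (k + 1 + vs.length) (List.take k arr) = [] :=
      List.drop_eq_nil_of_le (by simp; omega)
    have e4 : List.drop (k + 1 + vs.length - k) (v :: List.drop (k + 1) arr)
        = List.drop (k + (v :: vs).length) arr := by
      have hx : k + 1 + vs.length - k = vs.length + 1 := by omega
      rw [hx, List.drop_succ_cons, List.drop_drop]
      congr 1; simp; omega
    rw [e1, e2, e3, e4]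
    simp

theorem pvFoldB_eq (l : Nat) (merged : List Int) (j : Nat) (arr : List Int)
    (ops : List (String × Int × Int)) :
    (PySem.List.enumerate merged (j : Int)).foldl
      (fun st p => (st.1.set ((l : Int) + p.1).toNat p.2,
                    st.2 ++ [("w", p.2, (l : Int) + p.1)])) (arr, ops)
      = (pvSetSeg arr (l + j) merged, ops ++ pvTags merged (l + j)) := by
  induction merged generalizing j arr ops with
  | nil => simp [PySem.List.enumerate_nil, pvSetSeg, pvTags]
  | cons v vs ih =>
    rw [PySem.List.enumerate_cons, List.foldl_cons]
    have h2 : ((j : Int) + 1) = ((j + 1 : Nat) : Int) := by push_cast; ring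
    have h1 : ((l : Int) + (j : Int)).toNat = l + j := by omega
    simp only [h2, h1]
    rw [ih (j + 1) (arr.set (l + j) v) (ops ++ [("w", v, (l : Int) + (j : Int))])]
    have h3 : (l : Int) + (j : Int) = ((l + j : Nat) : Int) := by push_cast; ring
    have h4 : l + (j + 1) = (l + j) + 1 := by omega
    rw [h4, h3]
    simp only [pvSetSeg, pvTags]
    simp

-- the segment arr[l..r] (inclusive)
def pvSeg (arr : List Int) (l r : Nat) : List Int := (arr.drop l).take (r + 1 - l)

theorem pvMapRange_eq (arr : List Int) (l n : Nat) (h : l + n ≤ arr.length) :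
    (List.range n).map (fun i => arr.getD (l + i) 0) = (arr.drop l).take n := by
  apply List.ext_getElem
  · simp; omega
  · intro i h1 h2
    simp only [List.getElem_map, List.getElem_range, List.getElem_take, List.getElem_drop]
    have hi : i < n := by simpa using h1
    rw [List.getD_eq_getElem arr 0 (by omega)]

theorem pvChar_len {arr res : List Int} {l r : Nat}
    (h : res = arr.take l ++ PySem.List.sorted (pvSeg arr l r) (fun x => x) false ++ arr.drop (r + 1))
    (hl : l ≤ r) (hr : r < arr.length) : res.length = arr.length := by
  rw [h]
  simp [PySem.List.length_sorted, pvSeg]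
  omega

theorem pvSeg_split (arr : List Int) (l m r : Nat)
    (hl : l ≤ m) (hmr : m < r) (hr : r < arr.length) :
    pvSeg arr l r = pvSeg arr l m ++ pvSeg arr (m + 1) r := by
  unfold pvSeg
  have e : r + 1 - l = (m + 1 - l) + (r + 1 - (m + 1)) := by omega
  rw [e, List.take_add, List.drop_drop]
  have e2 : l + (m + 1 - l) = m + 1 := by omega
  rw [e2]

theorem pvSingleton_case (fuel l : Nat) (arr : List Int) (ops : List (String × Int × Int))
    (hr : l < arr.length) :
    pvMergeSortA fuel arr l l ops = pvMergeSortB fuel arr l l ops ∧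
    (pvMergeSortA fuel arr l l ops).1
      = arr.take l ++ PySem.List.sorted (pvSeg arr l l) (fun x => x) false ++ arr.drop (l + 1) := by
  have hseg : pvSeg arr l l = [arr[l]] := by
    unfold pvSeg
    have e : l + 1 - l = 0 + 1 := by omega
    rw [e, List.drop_eq_getElem_cons hr, List.take_succ_cons, List.take_zero]
  constructor
  · rw [pvMergeSortA.eq_def, pvMergeSortB.eq_def]
    simp
  · rw [pvMergeSortA.eq_def, if_neg (lt_irrefl l)]
    rw [hseg]
    have hs : PySem.List.sorted [arr[l]] (fun x : Int => x) false = [arr[l]] :=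
      PySem.List.sorted_eq_self_of_pairwise [arr[l]] (fun x : Int => x) (List.pairwise_singleton _ _)
    rw [hs]
    conv_lhs => rw [← List.take_append_drop l arr, List.drop_eq_getElem_cons hr]
    simp

theorem pvStepA {a1 a2 : List Int} {o1 o2 : List (String × Int × Int)}
    (fuel : Nat) (arr : List Int) (l r m : Nat) (ops : List (String × Int × Int))
    (hm : m = l + (r - l) / 2) (hlt : l < r)
    (h1 : pvMergeSortA fuel arr l m ops = (a1, o1))
    (h2 : pvMergeSortA fuel a1 (m + 1) r o1 = (a2, o2)) :
    pvMergeSortA (fuel + 1) arr l r ops = pvMergeA a2 l m r o2 := by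
  subst hm
  rw [pvMergeSortA.eq_def]
  simp [hlt, h1, h2]

theorem pvStepB {a1 a2 : List Int} {o1 o2 : List (String × Int × Int)}
    (fuel : Nat) (arr : List Int) (l r m : Nat) (ops : List (String × Int × Int))
    (hm : m = l + (r - l) / 2) (hlt : l < r)
    (h1 : pvMergeSortB fuel arr l m ops = (a1, o1))
    (h2 : pvMergeSortB fuel a1 (m + 1) r o1 = (a2, o2)) :
    pvMergeSortB (fuel + 1) arr l r ops = pvMergeB a2 l r o2 := by
  subst hm
  rw [pvMergeSortB.eq_def]
  simp [hlt, h1, h2]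

-- main invariant: on a valid call, A and B coincide and the result array is the
-- input with the segment [l, r] replaced by its sort
theorem pvMain (n : Nat) : ∀ (l r : Nat) (arr : List Int) (ops : List (String × Int × Int)),
    r - l ≤ n → l ≤ r → r < arr.length →
    pvMergeSortA n arr l r ops = pvMergeSortB n arr l r ops ∧
    (pvMergeSortA n arr l r ops).1
      = arr.take l ++ PySem.List.sorted (pvSeg arr l r) (fun x => x) false ++ arr.drop (r + 1) := by
  induction n with
  | zero =>
    intro l r arr ops hn hlr hr
    have hEq : l = r := by omega
    subst hEq
    exact pvSingleton_case 0 l arr ops hr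
  | succ n ih =>
    intro l r arr ops hn hlr hr
    by_cases hlt : l < r
    · -- recursive case
      set m := l + (r - l) / 2 with hmdef
      have hlm : l ≤ m := by omega
      have hmr : m < r := by omega
      -- first recursive call
      rcases hres1 : pvMergeSortA n arr l m ops with ⟨a1, o1⟩
      obtain ⟨e1, c1⟩ := ih l m arr ops (by omega) hlm (by omega)
      rw [hres1] at e1 c1
      dsimp only at c1
      have hlen1 : a1.length = arr.length := pvChar_len c1 hlm (by omega)
      -- second recursive call
      rcases hres2 : pvMergeSortA n a1 (m + 1) r o1 with ⟨a2, o2⟩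
      obtain ⟨e2, c2⟩ := ih (m + 1) r a1 o1 (by omega) (by omega) (by omega)
      rw [hres2] at e2 c2
      dsimp only at c2
      -- abbreviations
      set SL := PySem.List.sorted (pvSeg arr l m) (fun x => x) false with hSLdef
      set T := arr.drop (r + 1) with hTdef
      have hElen : (arr.take l).length = l := by simp; omega
      have hSLlen : SL.length = m + 1 - l := by
        rw [hSLdef]; simp [PySem.List.length_sorted, pvSeg]; omega
      -- a1 facts
      have hhd : a1.take (m + 1) = arr.take l ++ SL := by
        rw [c1]; exact List.take_left' (by simp [hSLlen]; omega)
      have htl : a1.drop (m + 1) = arr.drop (m + 1) := by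
        rw [c1]; exact List.drop_left' (by simp [hSLlen]; omega)
      have hddrop : ∀ x : List Int, List.drop (r + 1) x = List.drop (r - m) (List.drop (m + 1) x) := by
        intro x; rw [List.drop_drop]; congr 1; omega
      have hdr1 : a1.drop (r + 1) = T := by
        rw [hTdef, hddrop a1, hddrop arr, htl]
      have hseg2 : pvSeg a1 (m + 1) r = pvSeg arr (m + 1) r := by
        unfold pvSeg; rw [htl]
      set SR := PySem.List.sorted (pvSeg arr (m + 1) r) (fun x => x) false with hSRdef
      have hSRlen : SR.length = r - m := by
        rw [hSRdef]; simp [PySem.List.length_sorted, pvSeg]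
        omega
      -- a2 characterization
      have c2' : a2 = (arr.take l ++ SL) ++ SR ++ T := by
        rw [c2, hhd, hseg2, hdr1]
      have hlen2 : a2.length = arr.length := by
        rw [c2']; simp [hElen, hSLlen, hSRlen, hTdef]; omega
      -- segment facts about a2
      have q1 : a2.take l = arr.take l := by
        rw [c2']
        simp only [List.append_assoc]
        exact List.take_left' hElen
      have qdropl : a2.drop l = SL ++ (SR ++ T) := by
        rw [c2']
        simp only [List.append_assoc]
        exact List.drop_left' hElen
      have q2 : (a2.drop l).take (m + 1 - l) = SL := by
        rw [qdropl]; exact List.take_left' hSLlen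
      have qdropm : a2.drop (m + 1) = SR ++ T := by
        have : a2.drop (m + 1) = (a2.drop l).drop (m + 1 - l) := by
          rw [List.drop_drop]; congr 1; omega
        rw [this, qdropl, List.drop_left' hSLlen]
      have q3 : (a2.drop (m + 1)).take (r - m) = SR := by
        rw [qdropm]; exact List.take_left' hSRlen
      have q4 : (a2.drop l).take (r + 1 - l) = SL ++ SR := by
        rw [qdropl, ← List.append_assoc]
        have : r + 1 - l = (SL ++ SR).length := by simp [hSLlen, hSRlen]; omega
        rw [this]; exact List.take_left' rfl
      have q5 : a2.drop (r + 1) = T := by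
        have : a2.drop (r + 1) = (a2.drop (m + 1)).drop (r - m) := by
          rw [List.drop_drop]; congr 1; omega
        rw [this, qdropm, List.drop_left' hSRlen]
      -- the merged value sequence
      have hSLp : SL.Pairwise (· ≤ ·) := by
        rw [hSLdef]; exact PySem.List.sorted_pairwise _ _
      have hSRp : SR.Pairwise (· ≤ ·) := by
        rw [hSRdef]; exact PySem.List.sorted_pairwise _ _
      set M := PySem.List.sorted (SL ++ SR) (fun x => x) false with hMdef
      have hMerge : pvMerge SL SR = M := pvMerge_eq_sorted hSLp hSRp
      have hMlen : M.length = r + 1 - l := by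
        rw [hMdef]; simp [PySem.List.length_sorted, hSLlen, hSRlen]; omega
      have hMsort : M = PySem.List.sorted (pvSeg arr l r) (fun x => x) false := by
        rw [hMdef]
        apply PySem.List.sorted_eq_sorted_of_perm _ _ _ (fun a b h => h)
        rw [pvSeg_split arr l m r hlm hmr hr]
        exact (PySem.List.sorted_perm _ _ _).append (PySem.List.sorted_perm _ _ _)
      -- evaluate A's merge
      have hA : pvMergeA a2 l m r o2 = (pvSetSeg a2 l M, o2 ++ pvTags M l) := by
        rw [pvMergeA]
        have hL : (List.range (m - l + 1)).map (fun i => a2.getD (l + i) 0) = SL := by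
          rw [pvMapRange_eq a2 l (m - l + 1) (by omega)]
          have : m - l + 1 = m + 1 - l := by omega
          rw [this]; exact q2
        have hR : (List.range (r - m)).map (fun j => a2.getD (m + 1 + j) 0) = SR := by
          rw [pvMapRange_eq a2 (m + 1) (r - m) (by omega)]
          exact q3
        simp only [hL, hR, pvMergeLoop_eq, hMerge]
      -- evaluate B's merge
      have hB : pvMergeB a2 l r o2 = (pvSetSeg a2 l M, o2 ++ pvTags M l) := by
        have hcast : ((r : Int) + 1) = ((r + 1 : Nat) : Int) := by push_cast; ring
        have hfold := pvFoldB_eq l M 0 a2 o2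
        rw [Nat.cast_zero] at hfold
        rw [pvMergeB]
        simp only [hcast, PySem.List.slice_natCast, q4, ← hMdef]
        simpa using hfold
      -- the two step equations
      have hres1B : pvMergeSortB n arr l m ops = (a1, o1) := e1.symm
      have hres2B : pvMergeSortB n a1 (m + 1) r o1 = (a2, o2) := e2.symm
      have stepA := pvStepA n arr l r m ops hmdef hlt hres1 hres2
      have stepB := pvStepB n arr l r m ops hmdef hlt hres1B hres2B
      refine ⟨?_, ?_⟩
      · rw [stepA, stepB, hA, hB]
      · rw [stepA, hA]
        have hle : l + M.length ≤ a2.length := by rw [hMlen, hlen2]; omega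
        dsimp only
        rw [pvSetSeg_eq M l a2 hle]
        have hidx : l + M.length = r + 1 := by rw [hMlen]; omega
        rw [hidx, q1, q5, hMsort]
    · have hEq : l = r := by omega
      subst hEq
      exact pvSingleton_case (n + 1) l arr ops hr

-- ===== VERDICT (by name: the statement is the Claim_ definition above) =====
theorem merge_ops_spec : Claim_equal_merge_ops := by
  intro arr _
  unfold Spec_merge_ops merge_ops merge_ops_alt
  cases arr with
  | nil => rw [pvMergeSortA.eq_def, pvMergeSortB.eq_def]; simp
  | cons x xs =>
    have h := pvMain (x :: xs).length 0 ((x :: xs).length - 1) (x :: xs) []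
      (by simp) (by omega) (by simp)
    rw [h.1]
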